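-- pv_equiv track=rewrite | github.com/GlebRadchenko/yul2venom | generator/optimizations.py | _log2_exact
-- ===== SOURCE A (Python) =====
-- def _log2_exact(n: int) -> int:
--     """Return log2(n) if n is an exact power of 2, else None."""
--     if n <= 0 or (n & (n - 1)) != 0:
--         return None
--     log2 = 0
--     while n > 1:
--         n >>= 1
--         log2 += 1
--     return log2
-- ===== SOURCE B (Python) =====
-- def _log2_exact(n: int) -> int:
--     """Return log2(n) if n is an exact power of 2, else None."""
--     if n <= 0 or (n & (n - 1)) != 0:
--         return None
--     return n.bit_length() - 1
-- ===== Notes on version B (the rewrite author's own statement) =====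
-- stated objective: idiomatic
-- what changed: Replaced the shift-and-count while loop with the closed form n.bit_length() - 1 after the identical power-of-two guard.
import Mathlib
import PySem

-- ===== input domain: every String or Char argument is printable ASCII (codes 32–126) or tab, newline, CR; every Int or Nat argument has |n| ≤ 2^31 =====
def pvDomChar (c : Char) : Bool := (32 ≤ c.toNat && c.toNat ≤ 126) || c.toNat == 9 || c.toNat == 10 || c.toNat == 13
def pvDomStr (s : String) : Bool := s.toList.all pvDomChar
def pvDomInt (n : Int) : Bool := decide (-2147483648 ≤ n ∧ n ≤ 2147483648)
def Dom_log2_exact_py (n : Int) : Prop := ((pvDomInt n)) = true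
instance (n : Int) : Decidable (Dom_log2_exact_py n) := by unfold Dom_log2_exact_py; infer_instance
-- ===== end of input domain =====

-- B replaces A's shift-and-count loop with the closed form n.bit_length() - 1 (more idiomatic).


-- ===== PORT A =====
-- the while loop: n >>= 1; log2 += 1 while n > 1 (n > 0 is guaranteed by the guard, so Nat state is exact)
def log2APyLoop (n : Nat) (log2 : Int) : Int :=
  if n > 1 then log2APyLoop (n / 2) (log2 + 1) else log2

def log2_exact_py (n : Int) : Option Int :=
  if n ≤ 0 ∨ (PySem.Int.band n (n - 1)) ≠ 0 then none
  else some (log2APyLoop n.toNat 0)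

-- ===== PORT B =====
-- n.bit_length() ported as PySem.Int.bitLength (exact on all ints)
def log2_exact_py_alt (n : Int) : Option Int :=
  if n ≤ 0 ∨ (PySem.Int.band n (n - 1)) ≠ 0 then none
  else some ((PySem.Int.bitLength n : Int) - 1)

-- ===== PRECONDITION & SPEC =====
def Spec_log2_exact_py (n : Int) (out : Option Int) : Prop := out = log2_exact_py_alt n
instance (n : Int) (out : Option Int) : Decidable (Spec_log2_exact_py n out) := by unfold Spec_log2_exact_py; infer_instance

-- ===== CLAIM (what is proved, stated in full; the proofs are below) =====
def Claim_equal_log2_exact_py : Prop := ∀ (n : Int), Dom_log2_exact_py n → Spec_log2_exact_py n (log2_exact_py n)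

-- ===== LEMMAS AND PROOFS =====
theorem log2APyLoop_eq_bitLength (n : Nat) (acc : Int) (hn : 0 < n) :
    log2APyLoop n acc = acc + (PySem.Int.bitLength (n : Int) : Int) - 1 := by
  induction n using Nat.strong_induction_on generalizing acc with
  | _ n ih =>
    unfold log2APyLoop
    by_cases h : n > 1
    · rw [if_pos h, ih (n / 2) (Nat.div_lt_self (by omega) (by omega)) (acc + 1) (by omega)]
      conv_rhs => rw [PySem.Int.bitLength_natCast (by omega : 0 < n)]
      push_cast
      ring
    · rw [if_neg h]
      have : n = 1 := by omega
      subst this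
      norm_num [show PySem.Int.bitLength (1 : Int) = 1 from by decide]

-- ===== VERDICT (by name: the statement is the Claim_ definition above) =====
theorem log2_exact_py_spec : Claim_equal_log2_exact_py := by
  intro n _
  unfold Spec_log2_exact_py log2_exact_py log2_exact_py_alt
  split
  · rfl
  · rename_i h
    rw [log2APyLoop_eq_bitLength n.toNat 0 (by omega)]
    rw [Int.toNat_of_nonneg (by omega)]
    ring
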